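-- pv_equiv track=rewrite | github.com/Apoll011/LoGate | src/logic.py | filtrar_lista
-- ===== SOURCE A (Python) =====
-- def filtrar_lista(lista):
--     filtrados = {}
--
--     for item in lista:
--         P, T, priority = item
--
--         if (T, P) not in filtrados or priority < filtrados[(T, P)][2]:
--             filtrados[(T, P)] = item
--
--     resultado_filtrado = list(filtrados.values())
--     return resultado_filtrado
-- ===== SOURCE B (Python) =====
-- def filtrar_lista(lista):
--     grupos = {}
--     for item in lista:
--         P, T, priority = item
--         grupos.setdefault((T, P), []).append(item)
--     return [min(g, key=lambda it: it[2]) for g in grupos.values()]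
-- ===== Notes on version B (the rewrite author's own statement) =====
-- stated objective: alternative
-- what changed: B replaces A's single-pass keep-best-so-far dict with a two-phase decomposition: first group all items by (T,P) key with setdefault, then take min(group, key=priority) per group in key first-appearance order.
import Mathlib
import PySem

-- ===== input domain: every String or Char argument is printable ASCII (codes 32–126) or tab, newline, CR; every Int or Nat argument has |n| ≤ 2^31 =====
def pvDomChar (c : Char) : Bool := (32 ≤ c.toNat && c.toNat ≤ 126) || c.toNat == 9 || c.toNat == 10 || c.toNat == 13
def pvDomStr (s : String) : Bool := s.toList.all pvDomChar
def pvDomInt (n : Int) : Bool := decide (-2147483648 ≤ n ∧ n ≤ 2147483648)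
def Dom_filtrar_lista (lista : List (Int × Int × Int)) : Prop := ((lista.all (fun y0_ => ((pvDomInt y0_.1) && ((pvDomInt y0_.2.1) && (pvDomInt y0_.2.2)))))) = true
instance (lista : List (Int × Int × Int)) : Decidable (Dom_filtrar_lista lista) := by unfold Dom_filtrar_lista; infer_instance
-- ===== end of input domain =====

-- B groups items by (T,P) first and then reduces each group by min-on-priority: a two-phase
-- decomposition with the same cost as A's single-pass keep-best dict (objective: alternative).

-- ===== PORT A =====
-- one pass; dict (T,P) -> best item so far, replaced on strictly smaller priority
def filtrar_lista (lista : List (Int × Int × Int)) : List (Int × Int × Int) :=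
  let filtrados := lista.foldl (fun d item =>
      -- 'if (T,P) not in filtrados or priority < filtrados[(T,P)][2]' (short-circuit 'or')
      match d.get? (item.2.1, item.1) with
      | none => d.insert (item.2.1, item.1) item
      | some cur => if item.2.2 < cur.2.2 then d.insert (item.2.1, item.1) item else d)
    (PySem.Dict.empty)
  filtrados.values

-- ===== PORT B =====
-- phase 1: grupos.setdefault((T,P),[]).append(item)  =  modify with default []
-- phase 2: min(g, key=lambda it: it[2]) per group (groups are nonempty, so min? is some)
def filtrar_lista_alt (lista : List (Int × Int × Int)) : List (Int × Int × Int) :=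
  let grupos := lista.foldl (fun g item => g.modify (item.2.1, item.1) [] (· ++ [item]))
    (PySem.Dict.empty)
  grupos.values.map (fun g =>
    match PySem.List.min? g (fun it => it.2.2) with
    | some m => m
    | none => (0, 0, 0))

-- ===== PRECONDITION & SPEC =====
def Spec_filtrar_lista (lista : List (Int × Int × Int)) (out : List (Int × Int × Int)) : Prop := out = filtrar_lista_alt lista
instance (lista : List (Int × Int × Int)) (out : List (Int × Int × Int)) : Decidable (Spec_filtrar_lista lista out) := by unfold Spec_filtrar_lista; infer_instance

-- ===== CLAIM (what is proved, stated in full; the proofs are below) =====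
def Claim_equal_filtrar_lista : Prop := ∀ (lista : List (Int × Int × Int)), Dom_filtrar_lista lista → Spec_filtrar_lista lista (filtrar_lista lista)

-- ===== LEMMAS AND PROOFS =====
def pvKey (it : Int × Int × Int) : Int × Int := (it.2.1, it.1)
def pvGrp (lista : List (Int × Int × Int)) (k : Int × Int) : List (Int × Int × Int) :=
  lista.filter (fun it => pvKey it == k)
def pvSel (g : List (Int × Int × Int)) : Int × Int × Int :=
  match PySem.List.min? g (fun it => it.2.2) with
  | some m => m
  | none => (0, 0, 0)
def pvStep (acc : Option (Int × Int × Int)) (x : Int × Int × Int) : Option (Int × Int × Int) :=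
  match acc with
  | none => some x
  | some m => if x.2.2 < m.2.2 then some x else some m

theorem pvMin?_eq (g : List (Int × Int × Int)) :
    PySem.List.min? g (fun it => it.2.2) = g.foldl pvStep none := by
  unfold PySem.List.min?
  congr 1
  funext acc x
  cases acc <;> rfl

theorem pvFoldl_some (xs : List (Int × Int × Int)) (b : Int × Int × Int) :
    ∃ m, List.foldl pvStep (some b) xs = some m := by
  induction xs generalizing b with
  | nil => exact ⟨b, rfl⟩
  | cons y ys ih =>
    simp only [List.foldl_cons]
    by_cases h : y.2.2 < b.2.2
    · rw [show pvStep (some b) y = some y by simp [pvStep, h]]; exact ih y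
    · rw [show pvStep (some b) y = some b by simp [pvStep, h]]; exact ih b

theorem pvFoldl_some' {g : List (Int × Int × Int)} (h : g ≠ []) :
    g.foldl pvStep none = some (pvSel g) := by
  cases g with
  | nil => exact absurd rfl h
  | cons x xs =>
    obtain ⟨m, hm⟩ := pvFoldl_some xs x
    have h2 : List.foldl pvStep none (x :: xs) = some m := by
      simpa only [List.foldl_cons] using hm
    rw [h2, pvSel, pvMin?_eq, h2]

theorem pvSel_append {g : List (Int × Int × Int)} (h : g ≠ []) (a : Int × Int × Int) :
    pvSel (g ++ [a]) = if a.2.2 < (pvSel g).2.2 then a else pvSel g := by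
  rw [pvSel, pvMin?_eq, List.foldl_append, pvFoldl_some' h]
  by_cases hlt : a.2.2 < (pvSel g).2.2
  · simp [pvStep, hlt]
  · simp [pvStep, hlt]

theorem pvGrp_append (l : List (Int × Int × Int)) (a : Int × Int × Int) (k : Int × Int) :
    pvGrp (l ++ [a]) k = pvGrp l k ++ (if pvKey a = k then [a] else []) := by
  rw [pvGrp, List.filter_append, pvGrp]
  congr 1
  by_cases h : pvKey a = k <;> simp [h]
def pvCanon (lista : List (Int × Int × Int)) : List ((Int × Int) × (Int × Int × Int)) :=
  (PySem.Set.ofList (lista.map pvKey)).map (fun k => (k, pvSel (pvGrp lista k)))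

def pvStepA (d : PySem.Dict (Int × Int) (Int × Int × Int)) (item : Int × Int × Int) :
    PySem.Dict (Int × Int) (Int × Int × Int) :=
  match d.get? (item.2.1, item.1) with
  | none => d.insert (item.2.1, item.1) item
  | some cur => if item.2.2 < cur.2.2 then d.insert (item.2.1, item.1) item else d

theorem pvA_items (lista : List (Int × Int × Int)) :
    (lista.foldl pvStepA PySem.Dict.empty).items = pvCanon lista := by
  induction lista using List.reverseRecOn with
  | nil => simp [pvCanon, PySem.Dict.empty]
  | append_singleton l a ih =>
    rw [List.foldl_append, List.foldl_cons, List.foldl_nil]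
    set d := l.foldl pvStepA PySem.Dict.empty with hd
    have hkeys : d.keys = PySem.Set.ofList (l.map pvKey) := by
      rw [PySem.Dict.keys, ih, pvCanon, List.map_map]
      simp [Function.comp_def]
    have hnd : d.keys.Nodup := by rw [hkeys]; exact PySem.Set.nodup_ofList _
    have hkeya : (a.2.1, a.1) = pvKey a := rfl
    by_cases hmem : pvKey a ∈ PySem.Set.ofList (l.map pvKey)
    · -- key already present
      have hex : ∃ it ∈ l, pvKey it = pvKey a := by
        have := (PySem.Set.mem_ofList (xs := l.map pvKey) (y := pvKey a)).mp hmem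
        simpa using this
      have hgne : pvGrp l (pvKey a) ≠ [] := by
        obtain ⟨it, hit, hk⟩ := hex
        intro hnil
        have : it ∈ pvGrp l (pvKey a) := by
          rw [pvGrp]; exact List.mem_filter.mpr ⟨hit, by simp [hk]⟩
        rw [hnil] at this; exact absurd this (List.not_mem_nil)
      have hmemit : (pvKey a, pvSel (pvGrp l (pvKey a))) ∈ d.items := by
        rw [ih, pvCanon]
        exact List.mem_map.mpr ⟨pvKey a, hmem, rfl⟩
      have hget : d.get? (pvKey a) = some (pvSel (pvGrp l (pvKey a))) :=
        PySem.Dict.get?_of_mem_items d hmemit hnd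
      have hkeyset : PySem.Set.ofList ((l ++ [a]).map pvKey) = PySem.Set.ofList (l.map pvKey) := by
        rw [List.map_append, List.map_singleton, PySem.Set.ofList_append_singleton,
          PySem.Set.add_of_mem hmem]
      have hcanon : pvCanon (l ++ [a]) = (PySem.Set.ofList (l.map pvKey)).map
          (fun k => (k, if k = pvKey a then (if a.2.2 < (pvSel (pvGrp l (pvKey a))).2.2 then a
            else pvSel (pvGrp l (pvKey a))) else pvSel (pvGrp l k))) := by
        rw [pvCanon, hkeyset]
        apply List.map_congr_left
        intro k hk
        by_cases hka : k = pvKey a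
        · subst hka
          rw [pvGrp_append, if_pos rfl, pvSel_append hgne a, if_pos rfl]
        · rw [pvGrp_append, if_neg (fun h => hka h.symm), List.append_nil, if_neg hka]
      have hstep : pvStepA d a = if a.2.2 < (pvSel (pvGrp l (pvKey a))).2.2
          then d.insert (pvKey a) a else d := by
        simp [pvStepA, hkeya, hget]
      rw [hstep]
      by_cases hlt : a.2.2 < (pvSel (pvGrp l (pvKey a))).2.2
      · rw [if_pos hlt]
        have hcont : d.contains (pvKey a) = true := by
          rw [PySem.Dict.contains_iff_mem_keys, hkeys]; exact hmem
        rw [PySem.Dict.items_insert_of_contains d a hcont, ih, pvCanon, List.map_map, hcanon]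
        apply List.map_congr_left
        intro k hk
        by_cases hka : k = pvKey a
        · subst hka; simp [hlt]
        · simp [hka]
      · rw [if_neg hlt, ih, pvCanon, hcanon]
        apply List.map_congr_left
        intro k hk
        by_cases hka : k = pvKey a
        · subst hka; simp [hlt]
        · simp [hka]
    · -- new key
      have hcont : d.contains (pvKey a) = false := by
        rw [← Bool.not_eq_true, PySem.Dict.contains_iff_mem_keys, hkeys]; exact hmem
      have hget : d.get? (pvKey a) = none := by
        rw [PySem.Dict.get?_eq_none_iff_contains d]; exact hcont
      have hgnil : pvGrp l (pvKey a) = [] := by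
        rw [pvGrp, List.filter_eq_nil_iff]
        intro it hit hbeq
        apply hmem
        rw [PySem.Set.mem_ofList]
        exact List.mem_map.mpr ⟨it, hit, by simpa using hbeq⟩
      have hstep : pvStepA d a = d.insert (pvKey a) a := by
        simp [pvStepA, hkeya, hget]
      have hrhs : pvCanon (l ++ [a]) = pvCanon l ++ [(pvKey a, a)] := by
        rw [pvCanon, List.map_append, List.map_singleton, PySem.Set.ofList_append_singleton,
          PySem.Set.add_of_not_mem hmem, List.map_append]
        congr 1
        · rw [pvCanon]
          apply List.map_congr_left
          intro k hk
          have hka : ¬ pvKey a = k := fun h => hmem (h ▸ hk)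
          rw [pvGrp_append, if_neg hka, List.append_nil]
        · rw [List.map_singleton, pvGrp_append, if_pos rfl, hgnil, List.nil_append]
          have : pvSel [a] = a := by rw [pvSel, pvMin?_eq]; rfl
          rw [this]
      rw [hstep, PySem.Dict.items_insert_of_not_contains d a hcont, ih, hrhs]

theorem pvFold_eq (lista : List (Int × Int × Int)) :
    lista.foldl (fun g item => g.modify (item.2.1, item.1) [] (· ++ [item])) (PySem.Dict.empty)
    = lista.foldl (fun g item => g.modify (pvKey item) [] (· ++ [item])) (PySem.Dict.empty) := rfl
theorem pvGrupos_keys (lista : List (Int × Int × Int)) :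
    (lista.foldl (fun g item => g.modify (item.2.1, item.1) [] (· ++ [item])) (PySem.Dict.empty)).keys
    = PySem.Set.ofList (lista.map pvKey) := by
  rw [pvFold_eq, PySem.Dict.keys_foldl_modify_key (key := pvKey)]
  simp [PySem.Dict.keys_empty, PySem.Set.update_nil_left]
theorem pvGrupos_getD (lista : List (Int × Int × Int)) (k : Int × Int) :
    (lista.foldl (fun g item => g.modify (item.2.1, item.1) [] (· ++ [item])) (PySem.Dict.empty)).getD k []
    = pvGrp lista k := by
  have h : lista.foldl (fun g item => g.modify (pvKey item) [] (· ++ [item])) (PySem.Dict.empty)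
      = (lista.map (fun it => (pvKey it, it))).foldl (fun d p => d.modify p.1 [] (· ++ [p.2])) (PySem.Dict.empty) := by
    rw [List.foldl_map]
  rw [pvFold_eq, h, PySem.Dict.getD_foldl_modify_append]
  simp [PySem.Dict.getD_empty, pvGrp, List.filter_map, Function.comp_def, List.map_map]
theorem pvGrupos_nodup (lista : List (Int × Int × Int)) :
    (lista.foldl (fun g item => g.modify (item.2.1, item.1) [] (· ++ [item])) (PySem.Dict.empty)).keys.Nodup := by
  rw [pvGrupos_keys]; exact PySem.Set.nodup_ofList _

theorem pvFoldA_eq (lista : List (Int × Int × Int)) :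
    lista.foldl (fun d item =>
      match d.get? (item.2.1, item.1) with
      | none => d.insert (item.2.1, item.1) item
      | some cur => if item.2.2 < cur.2.2 then d.insert (item.2.1, item.1) item else d)
      PySem.Dict.empty = lista.foldl pvStepA PySem.Dict.empty := rfl

theorem pvB_eq (lista : List (Int × Int × Int)) :
    filtrar_lista_alt lista = (pvCanon lista).map (·.2) := by
  rw [filtrar_lista_alt]
  set grupos := lista.foldl (fun g item => g.modify (item.2.1, item.1) [] (· ++ [item]))
    PySem.Dict.empty with hg
  have hnd : grupos.keys.Nodup := pvGrupos_nodup lista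
  rw [PySem.Dict.values_eq_map_keys grupos hnd []]
  rw [pvGrupos_keys lista, List.map_map, pvCanon, List.map_map]
  apply List.map_congr_left
  intro k hk
  simp only [Function.comp_def]
  rw [pvGrupos_getD lista k]
  rfl

-- ===== VERDICT (by name: the statement is the Claim_ definition above) =====
theorem filtrar_lista_spec : Claim_equal_filtrar_lista := by
  intro lista _
  unfold Spec_filtrar_lista filtrar_lista
  rw [pvB_eq, pvFoldA_eq, PySem.Dict.values, pvA_items lista]
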